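-- pv_equiv track=rewrite | github.com/YashIndane/codewars-solutions | python/zero-balanced_Array.py | is_zero_balanced
-- ===== SOURCE A (Python) =====
-- def is_zero_balanced(arr):
--     #your code here
--     if len(arr)>1:
--         s=sum(arr)
--         t=False
--         for x in arr:
--             if -x not in arr:
--                 return t
--         return True and s==0
--
--
--
--     else:
--         if arr==[0]: return True
--         return False
-- ===== SOURCE B (Python) =====
-- def is_zero_balanced(arr):
--     if not arr or sum(arr) != 0:
--         return False
--     vals = sorted(set(arr))
--     n = len(vals)
--     return all(vals[i] == -vals[n - 1 - i] for i in range(n))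
-- ===== Notes on version B (the rewrite author's own statement) =====
-- stated objective: alternative
-- what changed: Replaces the element-by-element membership scan with a sort-based symmetry test: sort the distinct values and check that the sorted list is its own negated reverse (vals[i] == -vals[n-1-i]), plus the zero-sum and nonempty guards.
import Mathlib
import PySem

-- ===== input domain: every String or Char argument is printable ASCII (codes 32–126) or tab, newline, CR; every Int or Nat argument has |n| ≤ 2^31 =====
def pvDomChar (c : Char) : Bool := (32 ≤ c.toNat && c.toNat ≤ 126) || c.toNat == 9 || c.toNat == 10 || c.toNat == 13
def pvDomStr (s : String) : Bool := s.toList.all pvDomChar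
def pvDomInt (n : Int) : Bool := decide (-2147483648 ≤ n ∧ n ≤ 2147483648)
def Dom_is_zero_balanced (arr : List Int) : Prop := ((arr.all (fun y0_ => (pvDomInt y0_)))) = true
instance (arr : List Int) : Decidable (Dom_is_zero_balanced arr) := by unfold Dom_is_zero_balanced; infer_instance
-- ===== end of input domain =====

-- B: instead of scanning each element for its negation, sort the distinct values once and
-- check the sorted list is its own negated reverse (vals[i] == -vals[n-1-i]); alternative algorithm, not measured faster.
-- ===== PORT A =====
-- the 'for x in arr: if -x not in arr: return t' loop, early return preserved
def pvLoopA (arr : List Int) : List Int → Int → Bool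
  | [], s => decide (s = 0)                    -- 'return True and s==0'
  | x :: rest, s => if !(arr.contains (-x)) then false else pvLoopA arr rest s

def is_zero_balanced (arr : List Int) : Bool :=
  if arr.length > 1 then
    let s := arr.sum
    pvLoopA arr arr s
  else
    if arr == [0] then true else false

-- ===== PORT B =====
def is_zero_balanced_alt (arr : List Int) : Bool :=
  if arr.isEmpty || !(decide (arr.sum = 0)) then false
  else
    let vals := PySem.List.sorted (PySem.Set.ofList arr) (fun x => x) false
    let n := vals.length
    (List.range n).all (fun i => vals.getD i 0 == -(vals.getD (n - 1 - i) 0))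

-- ===== PRECONDITION & SPEC =====
def Spec_is_zero_balanced (arr : List Int) (out : Bool) : Prop := out = is_zero_balanced_alt arr
instance (arr : List Int) (out : Bool) : Decidable (Spec_is_zero_balanced arr out) := by unfold Spec_is_zero_balanced; infer_instance

-- ===== CLAIM (what is proved, stated in full; the proofs are below) =====
def Claim_equal_is_zero_balanced : Prop := ∀ (arr : List Int), Dom_is_zero_balanced arr → Spec_is_zero_balanced arr (is_zero_balanced arr)

-- ===== LEMMAS AND PROOFS =====

-- A's loop returns 'each element's negation is present' && 'sum = 0'
lemma pvLoopA_eq (arr l : List Int) (s : Int) :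
    pvLoopA arr l s = (decide (∀ x ∈ l, -x ∈ arr) && decide (s = 0)) := by
  induction l with
  | nil => simp [pvLoopA]
  | cons x rest ih =>
    by_cases h : -x ∈ arr <;> simp [pvLoopA, h, ih]

-- shorthand for B's sorted distinct values
def pvVals (arr : List Int) : List Int :=
  PySem.List.sorted (PySem.Set.ofList arr) (fun x => x) false

lemma pvVals_mem (arr : List Int) (x : Int) : x ∈ pvVals arr ↔ x ∈ arr := by
  simp [pvVals, PySem.List.mem_sorted, PySem.Set.mem_ofList]

lemma pvVals_pairwise (arr : List Int) : (pvVals arr).Pairwise (· < ·) :=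
  PySem.List.sorted_ofList_pairwise_lt arr

lemma pvVals_nodup (arr : List Int) : (pvVals arr).Nodup :=
  (pvVals_pairwise arr).imp (fun h => ne_of_lt h)

-- the index-symmetry check equals 'vals = reverse of its negation'
lemma pv_all_iff_rev (v : List Int) :
    ((List.range v.length).all
        (fun i => v.getD i 0 == -(v.getD (v.length - 1 - i) 0)) = true)
      ↔ v = (v.map (fun x => -x)).reverse := by
  rw [List.all_eq_true]
  constructor
  · intro h
    apply List.ext_getElem (by simp)
    intro i hi hi2
    have hx := h i (List.mem_range.mpr hi)
    simp only [beq_iff_eq] at hx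
    have hlt : v.length - 1 - i < v.length := by omega
    rw [List.getD_eq_getElem v 0 hi, List.getD_eq_getElem v 0 hlt] at hx
    rw [List.getElem_reverse]
    simp only [List.length_map, List.getElem_map]
    exact hx
  · intro h i hi
    have hi' : i < v.length := List.mem_range.mp hi
    have hlt : v.length - 1 - i < v.length := by omega
    rw [List.getD_eq_getElem v 0 hi', List.getD_eq_getElem v 0 hlt, beq_iff_eq]
    have := List.getElem_of_eq h hi'
    rw [List.getElem_reverse] at this
    simp only [List.length_map, List.getElem_map] at this
    exact this

-- the negated reverse of the sorted distinct values is itself strictly increasing,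
-- so (by uniqueness of the strictly sorted arrangement) it equals vals iff arr is closed under negation
lemma pv_rev_iff_closed (arr : List Int) :
    pvVals arr = ((pvVals arr).map (fun x => -x)).reverse ↔ (∀ x ∈ arr, -x ∈ arr) := by
  constructor
  · intro h x hx
    have hxv : x ∈ pvVals arr := (pvVals_mem arr x).mpr hx
    rw [h] at hxv
    rcases List.mem_map.mp (List.mem_reverse.mp hxv) with ⟨y, hy, hyx⟩
    have : -x = y := by omega
    rw [← pvVals_mem arr, this]
    exact hy
  · intro hcl
    have hmem : ∀ y : Int, y ∈ ((pvVals arr).map (fun x => -x)).reverse ↔ y ∈ pvVals arr := by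
      intro y
      rw [List.mem_reverse, List.mem_map]
      constructor
      · rintro ⟨z, hz, hzy⟩
        have : y = -z := by omega
        rw [pvVals_mem] at hz ⊢
        exact this ▸ hcl z hz
      · intro hy
        refine ⟨-y, ?_, by ring⟩
        rw [pvVals_mem] at hy ⊢
        exact hcl y hy
    have hnd : ((pvVals arr).map (fun x => -x)).reverse.Nodup := by
      rw [List.nodup_reverse]
      exact (pvVals_nodup arr).map (fun a b h => by omega)
    have hperm : ((pvVals arr).map (fun x => -x)).reverse.Perm (pvVals arr) :=
      (List.perm_ext_iff_of_nodup hnd (pvVals_nodup arr)).mpr hmem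
    have hpw : (((pvVals arr).map (fun x => -x)).reverse).Pairwise (· < ·) := by
      rw [List.pairwise_reverse]
      exact List.Pairwise.map (fun x => -x) (fun {a b} (h : a < b) => by dsimp only; omega)
        (pvVals_pairwise arr)
    exact List.Perm.eq_of_pairwise (fun a b _ _ h1 h2 => by omega)
      (pvVals_pairwise arr) hpw hperm.symm

-- ===== VERDICT (by name: the statement is the Claim_ definition above) =====
theorem is_zero_balanced_spec : Claim_equal_is_zero_balanced := by
  intro arr _
  unfold Spec_is_zero_balanced is_zero_balanced is_zero_balanced_alt
  match arr with
  | [] => rfl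
  | [a] =>
    by_cases h : a = 0
    · subst h; rfl
    · simp [h, List.sum]
  | a :: b :: rest =>
    rw [if_pos (by simp), pvLoopA_eq]
    rw [show PySem.List.sorted (PySem.Set.ofList (a :: b :: rest)) (fun x => x) false
          = pvVals (a :: b :: rest) from rfl]
    simp only [List.sum_cons]
    by_cases hs : a + (b + rest.sum) = 0
    · rw [if_neg (by simp [hs])]
      simp only [hs, decide_true, Bool.and_true]
      by_cases hcl : ∀ x ∈ a :: b :: rest, -x ∈ a :: b :: rest
      · rw [decide_eq_true hcl, eq_comm]
        rw [show (pvVals (a :: b :: rest)).length = List.length (pvVals (a :: b :: rest)) from rfl]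
        exact (pv_all_iff_rev _).mpr ((pv_rev_iff_closed _).mpr hcl)
      · rw [decide_eq_false hcl, eq_comm, Bool.eq_false_iff]
        intro habs
        exact hcl ((pv_rev_iff_closed _).mp ((pv_all_iff_rev _).mp habs))
    · rw [if_pos (by simp [hs])]
      simp [hs]
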